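-- pv_equiv track=rewrite | github.com/Mondego/pyreco | repoData/soimort-you-get/allPythonContent.py | merge_stts
-- ===== SOURCE A (Python) =====
-- def merge_stts(samples_list):
--     sample_list = []
--     for samples in samples_list:
--         assert len(samples) == 1
--         sample_list.append(samples[0])
--     counts, durations = zip(*sample_list)
--     assert len(set(durations)) == 1, 'not all durations equal'
--     return [(sum(counts), durations[0])]
-- ===== SOURCE B (Python) =====
-- def merge_stts(samples_list):
--     [(total, duration)] = samples_list[0]
--     for samples in samples_list[1:]:
--         [(count, dur)] = samples
--         assert dur == duration, 'not all durations equal'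
--         total += count
--     return [(total, duration)]
-- ===== Notes on version B (the rewrite author's own statement) =====
-- stated objective: simpler
-- what changed: Replaces the build-list/zip-transpose/set-dedup two-phase reduction with a single accumulating sweep that takes the duration from the first entry and sums counts in one pass.
import Mathlib
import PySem

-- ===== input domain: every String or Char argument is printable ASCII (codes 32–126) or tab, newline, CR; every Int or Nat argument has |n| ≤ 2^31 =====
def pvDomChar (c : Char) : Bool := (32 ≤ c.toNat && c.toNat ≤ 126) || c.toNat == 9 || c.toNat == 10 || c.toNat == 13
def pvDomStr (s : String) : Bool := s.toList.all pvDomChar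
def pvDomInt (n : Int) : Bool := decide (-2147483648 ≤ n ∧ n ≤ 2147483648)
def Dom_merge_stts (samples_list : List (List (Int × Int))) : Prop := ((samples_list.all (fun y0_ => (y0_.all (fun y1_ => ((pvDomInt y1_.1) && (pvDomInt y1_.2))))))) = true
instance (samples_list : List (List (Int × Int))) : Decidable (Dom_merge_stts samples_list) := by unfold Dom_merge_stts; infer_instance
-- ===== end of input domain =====

-- B replaces the build-list/zip/set two-phase reduction with a single accumulating
-- sweep (duration from the first entry, counts summed in one pass); objective: simpler.


-- ===== PORT A =====
-- builds sample_list by appending samples[0] for each samples, then transposes into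
-- counts/durations columns and returns [(sum counts, durations[0])]; the asserts and
-- zip-unpack raise exactly outside Pre_, where pyGet? defaults never fire.
def merge_stts (samples_list : List (List (Int × Int))) : List (Int × Int) :=
  let sample_list : List (Int × Int) :=
    samples_list.foldl (fun acc samples => acc ++ [(PySem.List.pyGet? samples 0).getD (0, 0)]) []
  let counts := sample_list.map Prod.fst
  let durations := sample_list.map Prod.snd
  [(counts.sum, (PySem.List.pyGet? durations 0).getD 0)]

-- ===== PORT B =====
-- single pass: duration and initial total from the first entry, then fold the rest
-- adding counts; the non-singleton match arms correspond to Python raising (outside Pre_).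
def merge_stts_alt (samples_list : List (List (Int × Int))) : List (Int × Int) :=
  match samples_list with
  | [] => []
  | s0 :: rest =>
    match s0 with
    | [(c0, d0)] =>
      [(rest.foldl (fun t samples =>
          match samples with
          | [(c, _)] => t + c
          | _ => t) c0, d0)]
    | _ => []

-- ===== PRECONDITION & SPEC =====
-- Pre_ excludes exactly the inputs where A raises: the empty list (zip ValueError),
-- a non-singleton inner list (AssertionError), a duration differing from the first's
-- (AssertionError 'not all durations equal').
def Pre_merge_stts (samples_list : List (List (Int × Int))) : Prop :=
  samples_list ≠ [] ∧
  ∀ s ∈ samples_list, s.length = 1 ∧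
    (s.headD (0, 0)).2 = ((samples_list.headD []).headD (0, 0)).2
instance (samples_list : List (List (Int × Int))) : Decidable (Pre_merge_stts samples_list) := by
  unfold Pre_merge_stts; infer_instance
def pvWitness_merge_stts : (List (List (Int × Int))) := [[(2, 5)], [(3, 5)], [(-1, 5)]]
def Spec_merge_stts (samples_list : List (List (Int × Int))) (out : List (Int × Int)) : Prop := out = merge_stts_alt samples_list
instance (samples_list : List (List (Int × Int))) (out : List (Int × Int)) : Decidable (Spec_merge_stts samples_list out) := by unfold Spec_merge_stts; infer_instance

-- ===== CLAIM (what is proved, stated in full; the proofs are below) =====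
def Claim_equal_merge_stts : Prop := ∀ (samples_list : List (List (Int × Int))), Dom_merge_stts samples_list → Pre_merge_stts samples_list → Spec_merge_stts samples_list (merge_stts samples_list)

-- ===== LEMMAS AND PROOFS =====

theorem foldl_append_map {α β : Type} (f : α → β) (l : List α) (init : List β) :
    l.foldl (fun acc x => acc ++ [f x]) init = init ++ l.map f := by
  induction l generalizing init with
  | nil => simp
  | cons x xs ih => simp [List.foldl, ih]

theorem alt_foldl_sum (rest : List (List (Int × Int))) (t : Int)
    (h : ∀ s ∈ rest, s.length = 1) :
    rest.foldl (fun t samples =>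
        match samples with
        | [(c, _)] => t + c
        | _ => t) t
      = t + (rest.map (fun s => (s.headD (0, 0)).1)).sum := by
  induction rest generalizing t with
  | nil => simp
  | cons s ss ih =>
    have hs : s.length = 1 := h s (by simp)
    match s, hs with
    | [(c, d)], _ =>
      simp only [List.foldl, List.map, List.sum_cons]
      rw [ih _ (fun x hx => h x (by simp [hx]))]
      simp [List.headD]
      ring

theorem merge_stts_spec_aux (samples_list : List (List (Int × Int)))
    (hpre : Pre_merge_stts samples_list) :
    merge_stts samples_list = merge_stts_alt samples_list := by
  obtain ⟨hne, hall⟩ := hpre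
  match samples_list, hne with
  | s0 :: rest, _ =>
    have hs0 : s0.length = 1 := (hall s0 (by simp)).1
    match s0, hs0 with
    | [(c0, d0)], _ =>
      have hlen : ∀ s ∈ rest, s.length = 1 := fun s hs => (hall s (by simp [hs])).1
      -- unfold A's port
      unfold merge_stts
      rw [foldl_append_map]
      simp only [List.map_cons]
      -- rewrite pyGet? of each element via headD
      have hmap : (rest.map (fun samples => (PySem.List.pyGet? samples 0).getD (0, 0)))
          = rest.map (fun s => s.headD (0, 0)) := by
        apply List.map_congr_left
        intro s hs
        have : s.length = 1 := hlen s hs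
        match s, this with
        | [p], _ => simp [PySem.List.pyGet?, PySem.List.pyIdx?, List.headD]
      rw [hmap]
      unfold merge_stts_alt
      simp only []
      rw [alt_foldl_sum rest c0 hlen]
      simp [PySem.List.pyGet?, PySem.List.pyIdx?, List.map_map, Function.comp_def]

-- ===== VERDICT (by name: the statement is the Claim_ definition above) =====
theorem merge_stts_spec : Claim_equal_merge_stts := by
  intro l _ hpre
  exact merge_stts_spec_aux l hpre
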